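-- pv_equiv track=rewrite | github.com/langchain-ai/langchain | langchain/cli/create/check_name.py | lint_name
-- ===== SOURCE A (Python) =====
-- LENGTH = "Name too long (>12)"
--
-- UPPERCASE = "Use of uppercase letters is discouraged"
--
-- SEPARATOR = "Use of `-` is discouraged, consider using `_`"
--
-- NUMERIC = "Use of numbers is discouraged"
--
-- def lint_name(name):
--     """Check name against PEP8's naming conventions"""
--     suggestions = []
--
--     if len(name) > 12:
--         suggestions.append(LENGTH)
--     if "-" in name or " " in name:
--         suggestions.append(SEPARATOR)
--     if any(x.isupper() for x in name):
--         suggestions.append(UPPERCASE)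
--     if any(x.isnumeric() for x in name):
--         suggestions.append(NUMERIC)
--
--     return suggestions
-- ===== SOURCE B (Python) =====
-- LENGTH = "Name too long (>12)"
-- UPPERCASE = "Use of uppercase letters is discouraged"
-- SEPARATOR = "Use of `-` is discouraged, consider using `_`"
-- NUMERIC = "Use of numbers is discouraged"
--
-- def lint_name(name):
--     """Check name against PEP8's naming conventions (single pass over the chars)"""
--     has_sep = has_upper = has_numeric = False
--     for c in name:
--         has_sep = has_sep or c == '-' or c == ' '
--         has_upper = has_upper or c.isupper()
--         has_numeric = has_numeric or c.isnumeric()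
--     return (([LENGTH] if len(name) > 12 else [])
--             + ([SEPARATOR] if has_sep else [])
--             + ([UPPERCASE] if has_upper else [])
--             + ([NUMERIC] if has_numeric else []))
-- ===== Notes on version B (the rewrite author's own statement) =====
-- stated objective: alternative
-- what changed: B replaces A's four separate scans of the string (two substring tests and two any() generator passes) by one traversal accumulating three boolean flags, then assembles the message list by concatenation instead of conditional appends.
import Mathlib
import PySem

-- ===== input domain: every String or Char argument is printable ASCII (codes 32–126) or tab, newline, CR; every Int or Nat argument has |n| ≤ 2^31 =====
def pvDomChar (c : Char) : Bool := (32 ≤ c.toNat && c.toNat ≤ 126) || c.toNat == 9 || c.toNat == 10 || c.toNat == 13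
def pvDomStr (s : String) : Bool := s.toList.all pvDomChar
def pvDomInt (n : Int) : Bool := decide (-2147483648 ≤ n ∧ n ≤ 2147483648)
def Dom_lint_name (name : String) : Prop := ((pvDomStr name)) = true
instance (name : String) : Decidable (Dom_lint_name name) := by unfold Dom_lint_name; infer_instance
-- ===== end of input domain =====

-- B walks the characters once accumulating three flags instead of A's four separate scans; objective: alternative single-pass decomposition.


-- ===== PORT A =====
-- four successive conditional appends, as in the Python (isnumeric = isdigit on the ASCII domain)
def lint_name (name : String) : List String :=
  let cs := name.toList
  let s0 : List String := []
  let s1 := if PySem.Str.len name > 12 then s0 ++ ["Name too long (>12)"] else s0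
  let s2 := if cs.contains '-' || cs.contains ' ' then s1 ++ ["Use of `-` is discouraged, consider using `_`"] else s1
  let s3 := if cs.any PySem.Chars.isupper then s2 ++ ["Use of uppercase letters is discouraged"] else s2
  if cs.any PySem.Chars.isdigit then s3 ++ ["Use of numbers is discouraged"] else s3

-- ===== PORT B =====
-- one fold over the characters accumulating (has_sep, has_upper, has_numeric), then concatenation
def lint_name_alt (name : String) : List String :=
  let f := name.toList.foldl
    (fun (f : Bool × Bool × Bool) c =>
      (f.1 || (c == '-' || c == ' '), f.2.1 || PySem.Chars.isupper c, f.2.2 || PySem.Chars.isdigit c))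
    (false, false, false)
  (if PySem.Str.len name > 12 then ["Name too long (>12)"] else []) ++
  (if f.1 then ["Use of `-` is discouraged, consider using `_`"] else []) ++
  (if f.2.1 then ["Use of uppercase letters is discouraged"] else []) ++
  (if f.2.2 then ["Use of numbers is discouraged"] else [])

-- ===== PRECONDITION & SPEC =====
def Spec_lint_name (name : String) (out : List String) : Prop := out = lint_name_alt name
instance (name : String) (out : List String) : Decidable (Spec_lint_name name out) := by unfold Spec_lint_name; infer_instance

-- ===== CLAIM (what is proved, stated in full; the proofs are below) =====
def Claim_equal_lint_name : Prop := ∀ (name : String), Dom_lint_name name → Spec_lint_name name (lint_name name)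

-- ===== LEMMAS AND PROOFS =====
theorem lint_flags_eq (cs : List Char) (a b c : Bool) :
    cs.foldl
      (fun (f : Bool × Bool × Bool) ch =>
        (f.1 || (ch == '-' || ch == ' '), f.2.1 || PySem.Chars.isupper ch, f.2.2 || PySem.Chars.isdigit ch))
      (a, b, c)
    = (a || (cs.contains '-' || cs.contains ' '), b || cs.any PySem.Chars.isupper, c || cs.any PySem.Chars.isdigit) := by
  induction cs generalizing a b c with
  | nil => simp
  | cons x xs ih =>
    simp only [List.foldl_cons, ih, List.contains_cons, List.any_cons]
    refine Prod.ext ?_ (Prod.ext ?_ ?_) <;> simp [Bool.or_assoc, Bool.or_comm, Bool.or_left_comm, BEq.comm]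

-- ===== VERDICT (by name: the statement is the Claim_ definition above) =====
theorem lint_name_spec : Claim_equal_lint_name := by
  intro name _
  unfold Spec_lint_name lint_name lint_name_alt
  simp only [lint_flags_eq, Bool.false_or]
  split_ifs <;> simp_all
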